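-- pv_equiv track=rewrite | github.com/ukbonn/ukb-gpt | utils/stack/startup.py | _encode_firewall_egress_rules
-- ===== SOURCE A (Python) =====
-- def _encode_firewall_egress_rules(rules: list[tuple[str, str, int]]) -> str:
--     encoded: list[str] = []
--     seen: set[tuple[str, str, int]] = set()
--     for protocol, address, port in rules:
--         key = (protocol.lower(), address, int(port))
--         if key in seen:
--             continue
--         seen.add(key)
--         encoded.append(f"{key[0]}|{key[1]}|{key[2]}")
--     return ",".join(encoded)
-- ===== SOURCE B (Python) =====
-- def _encode_firewall_egress_rules(rules: list[tuple[str, str, int]]) -> str: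
--     # Sieve-style dedup: repeatedly take the head of the worklist and purge all
--     # of its later duplicates, so no auxiliary seen-set is ever needed.
--     work = [(protocol.lower(), address, int(port)) for protocol, address, port in rules]
--     unique: list[tuple[str, str, int]] = []
--     while work:
--         head = work[0]
--         unique.append(head)
--         work = [k for k in work[1:] if k != head]
--     return ",".join(f"{p}|{a}|{port}" for p, a, port in unique)
-- ===== Notes on version B (the rewrite author's own statement) =====
-- stated objective: alternative
-- what changed: Replaces A's single pass with a seen-set membership guard by a sieve: a worklist loop that repeatedly appends the head key and filters all its later duplicates out of the remaining list, so no auxiliary seen structure exists; normalization and formatting are separate passes.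
import Mathlib
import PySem

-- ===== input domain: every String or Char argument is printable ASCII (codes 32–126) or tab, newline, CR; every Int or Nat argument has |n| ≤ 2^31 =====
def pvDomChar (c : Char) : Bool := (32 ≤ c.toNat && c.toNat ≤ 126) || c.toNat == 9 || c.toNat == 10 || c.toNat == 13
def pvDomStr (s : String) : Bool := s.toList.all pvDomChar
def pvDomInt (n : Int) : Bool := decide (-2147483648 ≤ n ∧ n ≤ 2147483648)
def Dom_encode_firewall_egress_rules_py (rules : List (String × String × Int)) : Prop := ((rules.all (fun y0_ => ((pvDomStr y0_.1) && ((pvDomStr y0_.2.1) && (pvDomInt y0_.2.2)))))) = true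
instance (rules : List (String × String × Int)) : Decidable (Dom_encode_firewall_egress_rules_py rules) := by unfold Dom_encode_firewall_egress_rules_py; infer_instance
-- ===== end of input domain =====

-- B replaces A's seen-set guarded single pass by a sieve: a worklist loop that takes the head key and filters its later duplicates out of the rest (no seen structure); objective: alternative, same return value.


-- ===== PORT A =====
-- f"{k0}|{k1}|{k2}" built on the List Char side (String.append is kernel-opaque)
def pvFmtA (k : String × String × Int) : String :=
  String.mk (k.1.toList ++ '|' :: k.2.1.toList ++ '|' :: PySem.Int.toChars k.2.2)

def pvStepA (st : List String × PySem.Set (String × String × Int))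
    (r : String × String × Int) : List String × PySem.Set (String × String × Int) :=
  let key := (PySem.Str.lower r.1, r.2.1, r.2.2)
  if PySem.Set.contains st.2 key then st
  else (st.1 ++ [pvFmtA key], PySem.Set.add st.2 key)

def encode_firewall_egress_rules_py (rules : List (String × String × Int)) : String :=
  let st := rules.foldl pvStepA ([], PySem.Set.empty)
  PySem.Str.join "," st.1

-- ===== PORT B =====
-- the while-loop of Source B: append the head to `unique`, filter it out of the remaining worklist
def pvSieveB (unique : List (String × String × Int)) (work : List (String × String × Int)) :
    List (String × String × Int) :=
  match work with
  | [] => unique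
  | k :: tl => pvSieveB (unique ++ [k]) (tl.filter (fun x => x != k))
termination_by work.length
decreasing_by
  simp only [List.length_unattach]
  exact Nat.lt_succ_of_le (le_trans (List.length_filter_le _ _) (by simp))

def encode_firewall_egress_rules_py_alt (rules : List (String × String × Int)) : String :=
  let work := rules.map (fun r => (PySem.Str.lower r.1, r.2.1, r.2.2))
  let unique := pvSieveB [] work
  PySem.Str.join "," (unique.map pvFmtA)

-- ===== PRECONDITION & SPEC =====
def Spec_encode_firewall_egress_rules_py (rules : List (String × String × Int)) (out : String) : Prop := out = encode_firewall_egress_rules_py_alt rules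
instance (rules : List (String × String × Int)) (out : String) : Decidable (Spec_encode_firewall_egress_rules_py rules out) := by unfold Spec_encode_firewall_egress_rules_py; infer_instance

-- ===== CLAIM (what is proved, stated in full; the proofs are below) =====
def Claim_equal_encode_firewall_egress_rules_py : Prop := ∀ (rules : List (String × String × Int)), Dom_encode_firewall_egress_rules_py rules → Spec_encode_firewall_egress_rules_py rules (encode_firewall_egress_rules_py rules)

-- ===== LEMMAS AND PROOFS =====

-- A's accumulated set never changes when elements it already contains stream past
lemma pvFoldlAddFilter {α : Type} [BEq α] [LawfulBEq α] (l : List α) :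
    ∀ (acc : List α) (k : α), k ∈ acc →
      List.foldl PySem.Set.add acc l = List.foldl PySem.Set.add acc (l.filter (fun x => x != k)) := by
  induction l with
  | nil => intro acc k _; rfl
  | cons x tl ih =>
    intro acc k hk
    by_cases hx : x = k
    · subst hx
      have hadd : PySem.Set.add acc x = acc := by simp [PySem.Set.add, PySem.Set.contains, hk]
      simp only [List.foldl_cons, List.filter_cons, bne_self_eq_false, Bool.false_eq_true,
        if_false, hadd]
      exact ih acc x hk
    · have hmem : k ∈ PySem.Set.add acc x := by
        by_cases h : x ∈ acc <;> simp [PySem.Set.add, PySem.Set.contains, h, hk]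
      have hbne : (x != k) = true := by simp [bne, hx]
      simp only [List.foldl_cons, List.filter_cons, hbne, if_true]
      exact ih _ k hmem

-- a head no later element equals can be pulled out of the accumulator
lemma pvFoldlAddPullHead {α : Type} [BEq α] [LawfulBEq α] (l : List α) :
    ∀ (acc : List α) (k : α), (∀ x ∈ l, x ≠ k) →
      List.foldl PySem.Set.add (k :: acc) l = k :: List.foldl PySem.Set.add acc l := by
  induction l with
  | nil => intro acc k _; rfl
  | cons x tl ih =>
    intro acc k hne
    have hx : x ≠ k := hne x (by simp)
    have hc : PySem.Set.add (k :: acc) x = k :: PySem.Set.add acc x := by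
      by_cases h : x ∈ acc <;>
        simp [PySem.Set.add, PySem.Set.contains, hx, h]
    rw [List.foldl_cons, List.foldl_cons, hc, ih _ k (fun y hy => hne y (by simp [hy]))]

lemma pvOfListCons (k : String × String × Int) (ks : List (String × String × Int)) :
    PySem.Set.ofList (k :: ks) = k :: PySem.Set.ofList (ks.filter (fun x => x != k)) := by
  have h0 : PySem.Set.ofList (k :: ks) = List.foldl PySem.Set.add [k] ks := by
    simp [PySem.Set.ofList_eq_foldl, List.foldl_cons, PySem.Set.add, PySem.Set.contains]
  rw [h0, pvFoldlAddFilter ks [k] k (by simp),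
    pvFoldlAddPullHead _ [] k (by intro x hx; simp at hx; exact fun he => by simp [he] at hx)]
  rfl

-- B's sieve computes exactly set-of-list order-preserving dedup, prefixed by the accumulator
lemma pvSieveEq : ∀ (n : Nat) (ks : List (String × String × Int)), ks.length ≤ n →
    ∀ acc, pvSieveB acc ks = acc ++ PySem.Set.ofList ks := by
  intro n
  induction n with
  | zero =>
    intro ks hks acc
    have : ks = [] := List.eq_nil_of_length_eq_zero (Nat.le_zero.mp hks)
    subst this; rw [pvSieveB.eq_def]; simp [PySem.Set.ofList_eq_foldl]
  | succ n ih =>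
    intro ks hks acc
    match ks with
    | [] => rw [pvSieveB.eq_def]; simp [PySem.Set.ofList_eq_foldl]
    | k :: tl =>
      have hlen : (tl.filter (fun x => x != k)).length ≤ n :=
        le_trans (List.length_filter_le _ _) (Nat.succ_le_succ_iff.mp hks)
      rw [show pvSieveB acc (k :: tl) = pvSieveB (acc ++ [k]) (tl.filter (fun x => x != k)) by
          rw [pvSieveB.eq_def],
        ih _ hlen, pvOfListCons]
      simp

-- characterisation of A's loop (seen-set fold): outputs = formatted first occurrences
lemma pvOfListSnoc {α : Type} [BEq α] (ks : List α) (k : α) :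
    PySem.Set.ofList (ks ++ [k]) = PySem.Set.add (PySem.Set.ofList ks) k := by
  simp [PySem.Set.ofList_eq_foldl, List.foldl_append]

lemma pvLoopA (rest : List (String × String × Int))
    (ks : List (String × String × Int)) :
    (rest.foldl pvStepA ((PySem.Set.ofList ks).map pvFmtA, PySem.Set.ofList ks)).1
      = (PySem.Set.ofList (ks ++ rest.map (fun r => (PySem.Str.lower r.1, r.2.1, r.2.2)))).map pvFmtA := by
  induction rest generalizing ks with
  | nil => simp
  | cons r rest ih =>
    have hsnoc := pvOfListSnoc ks (PySem.Str.lower r.1, r.2.1, r.2.2)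
    have hrw : ks ++ (r :: rest).map (fun r => (PySem.Str.lower r.1, r.2.1, r.2.2))
        = (ks ++ [(PySem.Str.lower r.1, r.2.1, r.2.2)])
          ++ rest.map (fun r => (PySem.Str.lower r.1, r.2.1, r.2.2)) := by simp
    rw [hrw, ← ih (ks ++ [(PySem.Str.lower r.1, r.2.1, r.2.2)])]
    by_cases h : (PySem.Str.lower r.1, r.2.1, r.2.2) ∈ ks
    · have he : PySem.Set.ofList (ks ++ [(PySem.Str.lower r.1, r.2.1, r.2.2)]) = PySem.Set.ofList ks := by
        rw [hsnoc]; simp [PySem.Set.add, PySem.Set.contains, h]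
      simp [List.foldl_cons, pvStepA, PySem.Set.contains, h, he]
    · have he : PySem.Set.ofList (ks ++ [(PySem.Str.lower r.1, r.2.1, r.2.2)])
          = PySem.Set.ofList ks ++ [(PySem.Str.lower r.1, r.2.1, r.2.2)] := by
        rw [hsnoc]; simp [PySem.Set.add, PySem.Set.contains, h]
      simp [List.foldl_cons, pvStepA, PySem.Set.contains, PySem.Set.add, h, he]

-- ===== VERDICT (by name: the statement is the Claim_ definition above) =====
theorem encode_firewall_egress_rules_py_spec : Claim_equal_encode_firewall_egress_rules_py := by
  intro rules _
  unfold Spec_encode_firewall_egress_rules_py encode_firewall_egress_rules_py encode_firewall_egress_rules_py_alt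
  have hA := pvLoopA rules []
  simp only [List.nil_append] at hA
  have hB := pvSieveEq (rules.map (fun r => (PySem.Str.lower r.1, r.2.1, r.2.2))).length _ le_rfl []
  simp only [List.nil_append] at hB
  show PySem.Str.join "," ((rules.foldl pvStepA ([], PySem.Set.empty)).1)
      = PySem.Str.join ","
          ((pvSieveB [] (rules.map fun r => (PySem.Str.lower r.1, r.2.1, r.2.2))).map pvFmtA)
  rw [hB]
  exact congrArg (PySem.Str.join ",") hA
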